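-- pv_equiv track=rewrite | github.com/adam147g/algorithms-and-data-structures | Ćwiczenia/Greedy/Even equals odd sum.py | suit_and_tie_2
-- ===== SOURCE A (Python) =====
-- def suit_and_tie_2(T):
--     swaps = 0
--     for i in range(0, len(T), 2):
--         for j in range(i + 1, len(T)):
--             if T[i] == T[j]:
--                 if j!=i+1:
--                     T[i+1], T[j] = T[j], T[i+1]
--                     swaps += 1
--                 break
--     return swaps
-- ===== SOURCE B (Python) =====
-- def _bisect_right(lst, x):
--     lo, hi = 0, len(lst)
--     while lo < hi:
--         mid = (lo + hi) // 2
--         if lst[mid] <= x: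
--             lo = mid + 1
--         else:
--             hi = mid
--     return lo
--
--
-- def _bisect_left(lst, x):
--     lo, hi = 0, len(lst)
--     while lo < hi:
--         mid = (lo + hi) // 2
--         if lst[mid] < x:
--             lo = mid + 1
--         else:
--             hi = mid
--     return lo
--
--
-- def suit_and_tie_2(T):
--     # per-value sorted position lists; nearest partner found by binary search
--     pos = {}
--     for idx, v in enumerate(T):
--         pos.setdefault(v, []).append(idx)
--     swaps = 0
--     for i in range(0, len(T), 2):
--         v = T[i]
--         lst = pos[v]
--         k = _bisect_right(lst, i)
--         if k == len(lst):
--             continue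
--         j = lst[k]
--         if j == i + 1:
--             continue
--         a = T[i + 1]
--         T[i + 1], T[j] = T[j], T[i + 1]
--         lst.pop(k)
--         lst.insert(_bisect_left(lst, i + 1), i + 1)
--         la = pos[a]
--         la.pop(_bisect_left(la, i + 1))
--         la.insert(_bisect_left(la, j), j)
--         swaps += 1
--     return swaps
-- ===== Notes on version B (the rewrite author's own statement) =====
-- stated objective: faster
-- what changed: Replaces the inner linear scan for the nearest equal value by per-value sorted position lists queried with hand-written binary search and updated incrementally on each swap.
import Mathlib
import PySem

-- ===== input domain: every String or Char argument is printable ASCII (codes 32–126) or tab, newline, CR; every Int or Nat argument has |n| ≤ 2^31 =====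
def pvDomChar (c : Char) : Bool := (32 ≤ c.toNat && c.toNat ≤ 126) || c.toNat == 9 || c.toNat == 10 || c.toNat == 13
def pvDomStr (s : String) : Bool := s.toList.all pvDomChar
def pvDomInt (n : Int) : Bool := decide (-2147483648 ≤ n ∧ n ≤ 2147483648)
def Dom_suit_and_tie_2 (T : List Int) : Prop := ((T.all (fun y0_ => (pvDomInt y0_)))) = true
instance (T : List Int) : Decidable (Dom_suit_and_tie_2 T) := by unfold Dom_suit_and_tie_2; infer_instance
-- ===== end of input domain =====

-- B replaces A's inner linear scan by per-value sorted position lists queried with binary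
-- search and updated on each swap; equivalence proved for the RETURN value (both Pythons
-- also mutate the argument list identically, which the Lean ports model functionally).

-- ===== PORT A =====
-- inner loop `for j in range(i+1, len(T)): ...` (fuel = len(T) - j iterations remain);
-- returns the (possibly swapped) list and the 0/1 increment of `swaps`
def pvScanA : Nat → List Int → Nat → Nat → List Int × Int
  | 0, T, _, _ => (T, 0)
  | f+1, T, i, j =>
    if j < T.length then
      if T.getD i 0 = T.getD j 0 then
        if j ≠ i + 1 then
          ((T.set (i+1) (T.getD j 0)).set j (T.getD (i+1) 0), 1)
        else (T, 0)
      else pvScanA f T i (j+1)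
    else (T, 0)

-- outer loop `for i in range(0, len(T), 2)` (fuel bounds the iteration count)
def pvRunA : Nat → List Int → Nat → Int
  | 0, _, _ => 0
  | f+1, T, i =>
    if i < T.length then
      (pvScanA (T.length - (i+1)) T i (i+1)).2 +
        pvRunA f (pvScanA (T.length - (i+1)) T i (i+1)).1 (i+2)
    else 0

def suit_and_tie_2 (T : List Int) : Int := pvRunA T.length T 0

-- ===== PORT B =====
-- hand-written `_bisect_right(lst, x)` from Source B: `while lo < hi` loop, fuel = hi - lo
def pvBR : Nat → List Int → Int → Nat → Nat → Nat
  | 0, _, _, lo, _ => lo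
  | f+1, lst, x, lo, hi =>
    if lo < hi then
      if lst.getD ((lo + hi) / 2) 0 ≤ x then pvBR f lst x ((lo + hi) / 2 + 1) hi
      else pvBR f lst x lo ((lo + hi) / 2)
    else lo

-- hand-written `_bisect_left(lst, x)` from Source B
def pvBL : Nat → List Int → Int → Nat → Nat → Nat
  | 0, _, _, lo, _ => lo
  | f+1, lst, x, lo, hi =>
    if lo < hi then
      if lst.getD ((lo + hi) / 2) 0 < x then pvBL f lst x ((lo + hi) / 2 + 1) hi
      else pvBL f lst x lo ((lo + hi) / 2)
    else lo

-- `pos = {}; for idx, v in enumerate(T): pos.setdefault(v, []).append(idx)`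
def pvBuild (T : List Int) : PySem.Dict Int (List Int) :=
  (PySem.List.enumerate T).foldl (fun d p => d.modify p.2 [] (fun l => l ++ [p.1]))
    PySem.Dict.empty

-- main loop of Source B (fuel bounds the iteration count; `lst.pop(k)` = eraseIdx k,
-- `lst.insert(p, x)` = PySem.List.insert)
def pvRunB : Nat → List Int → PySem.Dict Int (List Int) → Nat → Int
  | 0, _, _, _ => 0
  | f+1, T, pos, i =>
    if i < T.length then
      let v := T.getD i 0
      let lst := pos.getD v []
      let k := pvBR lst.length lst (i : Int) 0 lst.length
      if k = lst.length then pvRunB f T pos (i+2)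
      else
        let j := lst.getD k 0
        if j = (i : Int) + 1 then pvRunB f T pos (i+2)
        else
          let a := T.getD (i+1) 0
          let T' := (T.set (i+1) (T.getD j.toNat 0)).set j.toNat a
          let lst1 := lst.eraseIdx k
          let lst2 := PySem.List.insert lst1
            ((pvBL lst1.length lst1 ((i:Int)+1) 0 lst1.length : Nat) : Int) ((i:Int)+1)
          let pos1 := pos.insert v lst2
          let la := pos1.getD a []
          let la1 := la.eraseIdx (pvBL la.length la ((i:Int)+1) 0 la.length)
          let la2 := PySem.List.insert la1
            ((pvBL la1.length la1 j 0 la1.length : Nat) : Int) j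
          let pos2 := pos1.insert a la2
          1 + pvRunB f T' pos2 (i+2)
    else 0

def suit_and_tie_2_alt (T : List Int) : Int := pvRunB T.length T (pvBuild T) 0

-- ===== PRECONDITION & SPEC =====
def Spec_suit_and_tie_2 (T : List Int) (out : Int) : Prop := out = suit_and_tie_2_alt T
instance (T : List Int) (out : Int) : Decidable (Spec_suit_and_tie_2 T out) := by unfold Spec_suit_and_tie_2; infer_instance

-- ===== CLAIM (what is proved, stated in full; the proofs are below) =====
def Claim_equal_suit_and_tie_2 : Prop := ∀ (T : List Int), Dom_suit_and_tie_2 T → Spec_suit_and_tie_2 T (suit_and_tie_2 T)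

-- ===== LEMMAS AND PROOFS =====

-- the sorted list of positions of value u in T (what B's dict stores per key)
def pvPosL (T : List Int) (u : Int) : List Int :=
  ((List.range T.length).filter (fun k => T.getD k 0 == u)).map (fun k : Nat => (k : Int))

-- B's dictionary invariant
def pvInv (T : List Int) (pos : PySem.Dict Int (List Int)) : Prop :=
  ∀ u : Int, pos.getD u [] = pvPosL T u

theorem pvMem_posL (T : List Int) (u q : Int) :
    q ∈ pvPosL T u ↔ ∃ k : Nat, k < T.length ∧ T.getD k 0 = u ∧ q = (k : Int) := by
  unfold pvPosL
  constructor
  · intro hq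
    obtain ⟨k, hk, hkq⟩ := List.mem_map.1 hq
    obtain ⟨hkr, hke⟩ := List.mem_filter.1 hk
    exact ⟨k, List.mem_range.1 hkr, by simpa using hke, hkq.symm⟩
  · rintro ⟨k, hk, he, rfl⟩
    exact List.mem_map.2 ⟨k, List.mem_filter.2 ⟨List.mem_range.2 hk, by simpa using he⟩, rfl⟩

theorem pvPairwise_posL (T : List Int) (u : Int) : (pvPosL T u).Pairwise (· < ·) := by
  unfold pvPosL
  exact List.Pairwise.map (f := fun k : Nat => (k : Int))
    (fun a b hab => show ((a : Int) < (b : Int)) by exact_mod_cast hab)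
    (List.Pairwise.sublist List.filter_sublist List.pairwise_lt_range)

theorem pvSorted_ext (l1 l2 : List Int) (h1 : l1.Pairwise (· < ·)) (h2 : l2.Pairwise (· < ·))
    (hm : ∀ q, q ∈ l1 ↔ q ∈ l2) : l1 = l2 := by
  have n1 : l1.Nodup := h1.imp (fun hab => ne_of_lt hab)
  have n2 : l2.Nodup := h2.imp (fun hab => ne_of_lt hab)
  have hp : l1.Perm l2 := (List.perm_ext_iff_of_nodup n1 n2).2 hm
  exact hp.eq_of_pairwise (le := (· < ·)) (fun a b _ _ hab hba => absurd hba (lt_asymm hab)) h1 h2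

theorem pvGetD_mono (lst : List Int) (h : lst.Pairwise (· < ·)) (p q : Nat)
    (hpq : p < q) (hq : q < lst.length) : lst.getD p 0 < lst.getD q 0 := by
  rw [List.getD_eq_getElem _ _ (lt_trans hpq hq), List.getD_eq_getElem _ _ hq]
  exact List.pairwise_iff_getElem.1 h p q _ _ hpq

theorem pvGetD_set (l : List Int) (n k : Nat) (v : Int) :
    (l.set n v).getD k 0 = if n = k ∧ n < l.length then v else l.getD k 0 := by
  rw [List.getD_eq_getElem?_getD, List.getD_eq_getElem?_getD, List.getElem?_set]
  by_cases h1 : n = k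
  · subst h1
    by_cases h2 : n < l.length <;> simp [h2]
  · simp [h1]

theorem pvBR_spec (x : Int) : ∀ (f : Nat) (lst : List Int) (lo hi : Nat),
    lst.Pairwise (· < ·) → lo ≤ hi → hi ≤ lst.length → hi - lo ≤ f →
    (∀ m, m < lo → lst.getD m 0 ≤ x) →
    (∀ m, hi ≤ m → m < lst.length → x < lst.getD m 0) →
    lo ≤ pvBR f lst x lo hi ∧ pvBR f lst x lo hi ≤ hi ∧
      (∀ m, m < pvBR f lst x lo hi → lst.getD m 0 ≤ x) ∧
      (∀ m, pvBR f lst x lo hi ≤ m → m < lst.length → x < lst.getD m 0) := by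
  intro f
  induction f with
  | zero =>
    intro lst lo hi hp hlh hhl hf hlo hhi
    have : lo = hi := by omega
    subst this
    exact ⟨le_refl _, le_refl _, hlo, hhi⟩
  | succ f ih =>
    intro lst lo hi hp hlh hhl hf hlo hhi
    by_cases h2 : lo < hi
    · rw [pvBR, if_pos h2]
      by_cases hc : lst.getD ((lo + hi) / 2) 0 ≤ x
      · rw [if_pos hc]
        refine (ih lst ((lo + hi) / 2 + 1) hi hp (by omega) hhl (by omega) ?_ hhi).imp
          (fun h => by omega) (fun h => h)
        intro m hm
        rcases Nat.lt_succ_iff_lt_or_eq.1 hm with hm' | hm'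
        · exact le_of_lt (lt_of_lt_of_le (pvGetD_mono lst hp m _ hm' (by omega)) hc)
        · exact hm' ▸ hc
      · rw [if_neg hc]
        replace hc := not_le.1 hc
        refine (ih lst lo ((lo + hi) / 2) hp (by omega) (by omega) (by omega) hlo ?_).imp
          (fun h => h) (fun h => ⟨by omega, h.2⟩)
        intro m hm hmlen
        rcases Nat.eq_or_lt_of_le hm with hm' | hm'
        · exact hm' ▸ hc
        · exact lt_trans hc (pvGetD_mono lst hp _ m hm' hmlen)
    · rw [pvBR, if_neg h2]
      have : lo = hi := by omega
      exact ⟨le_refl _, le_of_eq this, hlo, fun m hm => hhi m (by omega)⟩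

theorem pvBL_spec (x : Int) : ∀ (f : Nat) (lst : List Int) (lo hi : Nat),
    lst.Pairwise (· < ·) → lo ≤ hi → hi ≤ lst.length → hi - lo ≤ f →
    (∀ m, m < lo → lst.getD m 0 < x) →
    (∀ m, hi ≤ m → m < lst.length → x ≤ lst.getD m 0) →
    lo ≤ pvBL f lst x lo hi ∧ pvBL f lst x lo hi ≤ hi ∧
      (∀ m, m < pvBL f lst x lo hi → lst.getD m 0 < x) ∧
      (∀ m, pvBL f lst x lo hi ≤ m → m < lst.length → x ≤ lst.getD m 0) := by
  intro f
  induction f with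
  | zero =>
    intro lst lo hi hp hlh hhl hf hlo hhi
    have : lo = hi := by omega
    subst this
    exact ⟨le_refl _, le_refl _, hlo, hhi⟩
  | succ f ih =>
    intro lst lo hi hp hlh hhl hf hlo hhi
    by_cases h2 : lo < hi
    · rw [pvBL, if_pos h2]
      by_cases hc : lst.getD ((lo + hi) / 2) 0 < x
      · rw [if_pos hc]
        refine (ih lst ((lo + hi) / 2 + 1) hi hp (by omega) hhl (by omega) ?_ hhi).imp
          (fun h => by omega) (fun h => h)
        intro m hm
        rcases Nat.lt_succ_iff_lt_or_eq.1 hm with hm' | hm'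
        · exact lt_trans (pvGetD_mono lst hp m _ hm' (by omega)) hc
        · exact hm' ▸ hc
      · rw [if_neg hc]
        replace hc := not_lt.1 hc
        refine (ih lst lo ((lo + hi) / 2) hp (by omega) (by omega) (by omega) hlo ?_).imp
          (fun h => h) (fun h => ⟨by omega, h.2⟩)
        intro m hm hmlen
        rcases Nat.eq_or_lt_of_le hm with hm' | hm'
        · exact hm' ▸ hc
        · exact le_of_lt (lt_of_le_of_lt hc (pvGetD_mono lst hp _ m hm' hmlen))
    · rw [pvBL, if_neg h2]
      have : lo = hi := by omega
      exact ⟨le_refl _, le_of_eq this, hlo, fun m hm => hhi m (by omega)⟩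

theorem pvBR_top (lst : List Int) (x : Int) (h : lst.Pairwise (· < ·)) :
    pvBR lst.length lst x 0 lst.length ≤ lst.length ∧
      (∀ m, m < pvBR lst.length lst x 0 lst.length → lst.getD m 0 ≤ x) ∧
      (∀ m, pvBR lst.length lst x 0 lst.length ≤ m → m < lst.length → x < lst.getD m 0) :=
  ((pvBR_spec x lst.length lst 0 lst.length h (by omega) (le_refl _) (by omega)
    (by omega) (by omega)).2)

theorem pvBL_top (lst : List Int) (x : Int) (h : lst.Pairwise (· < ·)) :
    pvBL lst.length lst x 0 lst.length ≤ lst.length ∧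
      (∀ m, m < pvBL lst.length lst x 0 lst.length → lst.getD m 0 < x) ∧
      (∀ m, pvBL lst.length lst x 0 lst.length ≤ m → m < lst.length → x ≤ lst.getD m 0) :=
  ((pvBL_spec x lst.length lst 0 lst.length h (by omega) (le_refl _) (by omega)
    (by omega) (by omega)).2)

theorem pvBR_all_le (lst : List Int) (x : Int) (h : lst.Pairwise (· < ·))
    (hall : ∀ p ∈ lst, p ≤ x) : pvBR lst.length lst x 0 lst.length = lst.length := by
  obtain ⟨hle, _, hge⟩ := pvBR_top lst x h
  by_contra hcon
  have hlt : pvBR lst.length lst x 0 lst.length < lst.length := by omega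
  have h1 := hge _ (le_refl _) hlt
  have h2 := hall _ (List.getD_eq_getElem lst 0 hlt ▸ List.getElem_mem hlt)
  omega

theorem pvBR_found (lst : List Int) (x p : Int) (h : lst.Pairwise (· < ·))
    (hp : p ∈ lst) (hpx : x < p) :
    pvBR lst.length lst x 0 lst.length < lst.length ∧
      x < lst.getD (pvBR lst.length lst x 0 lst.length) 0 ∧
      lst.getD (pvBR lst.length lst x 0 lst.length) 0 ∈ lst ∧
      (∀ q ∈ lst, x < q → lst.getD (pvBR lst.length lst x 0 lst.length) 0 ≤ q) := by
  obtain ⟨hle, hlt, hge⟩ := pvBR_top lst x h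
  obtain ⟨s, hs, hsx⟩ := List.mem_iff_getElem.1 hp
  set r := pvBR lst.length lst x 0 lst.length with hr
  have hrs : r ≤ s := by
    by_contra hcon
    have := hlt s (by omega)
    rw [List.getD_eq_getElem _ _ hs, hsx] at this
    omega
  have hrlen : r < lst.length := lt_of_le_of_lt hrs hs
  refine ⟨hrlen, hge r (le_refl _) hrlen,
    List.getD_eq_getElem lst 0 hrlen ▸ List.getElem_mem hrlen, ?_⟩
  intro q hq hxq
  obtain ⟨t, ht, htq⟩ := List.mem_iff_getElem.1 hq
  have hrt : r ≤ t := by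
    by_contra hcon
    have := hlt t (by omega)
    rw [List.getD_eq_getElem _ _ ht, htq] at this
    omega
  rcases Nat.eq_or_lt_of_le hrt with he | hlt'
  · rw [← htq, ← List.getD_eq_getElem lst 0 ht, he]
  · have := pvGetD_mono lst h r t hlt' ht
    rw [List.getD_eq_getElem _ _ ht, htq] at this
    omega

theorem pvBL_index (lst : List Int) (x : Int) (h : lst.Pairwise (· < ·)) (hx : x ∈ lst) :
    pvBL lst.length lst x 0 lst.length < lst.length ∧
      lst.getD (pvBL lst.length lst x 0 lst.length) 0 = x := by
  obtain ⟨hle, hlt, hge⟩ := pvBL_top lst x h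
  obtain ⟨s, hs, hsx⟩ := List.mem_iff_getElem.1 hx
  set r := pvBL lst.length lst x 0 lst.length with hr
  have hsr : r ≤ s := by
    by_contra hcon
    have := hlt s (by omega)
    rw [List.getD_eq_getElem _ _ hs, hsx] at this
    omega
  have hrlen : r < lst.length := lt_of_le_of_lt hsr hs
  refine ⟨hrlen, le_antisymm ?_ (hge r (le_refl _) hrlen)⟩
  rcases Nat.eq_or_lt_of_le hsr with he | hlt'
  · rw [he, List.getD_eq_getElem _ _ hs, hsx]
  · exact le_of_lt (by
      have := pvGetD_mono lst h r s hlt' hs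
      rw [List.getD_eq_getElem _ _ hs, hsx] at this
      exact this)

theorem pvEraseIdx_sorted (lst : List Int) (k : Nat) (h : lst.Pairwise (· < ·))
    (hk : k < lst.length) :
    (lst.eraseIdx k).Pairwise (· < ·) ∧
      ∀ q, q ∈ lst.eraseIdx k ↔ q ∈ lst ∧ q ≠ lst.getD k 0 := by
  refine ⟨List.Pairwise.eraseIdx k h, ?_⟩
  intro q
  rw [List.mem_eraseIdx_iff_getElem]
  constructor
  · rintro ⟨s, hs, hsk, rfl⟩
    refine ⟨List.getElem_mem hs, ?_⟩
    rw [List.getD_eq_getElem _ _ hk]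
    rcases Nat.lt_or_ge s k with hlt | hge
    · exact ne_of_lt (by
        have := pvGetD_mono lst h s k hlt hk
        rwa [List.getD_eq_getElem _ _ hs, List.getD_eq_getElem _ _ hk] at this)
    · have hlt : k < s := by omega
      exact ne_of_gt (by
        have := pvGetD_mono lst h k s hlt hs
        rwa [List.getD_eq_getElem _ _ hs, List.getD_eq_getElem _ _ hk] at this)
  · rintro ⟨hq, hne⟩
    obtain ⟨s, hs, hsq⟩ := List.mem_iff_getElem.1 hq
    refine ⟨s, hs, ?_, hsq⟩
    rintro rfl
    exact hne (by rw [← hsq, List.getD_eq_getElem _ _ hk])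

theorem pvInsert_sorted (lst : List Int) (x : Int) (h : lst.Pairwise (· < ·)) (hx : x ∉ lst) :
    (PySem.List.insert lst ((pvBL lst.length lst x 0 lst.length : Nat) : Int) x).Pairwise (· < ·) ∧
      ∀ q, q ∈ PySem.List.insert lst ((pvBL lst.length lst x 0 lst.length : Nat) : Int) x ↔
        q = x ∨ q ∈ lst := by
  obtain ⟨hle, hlt, hge⟩ := pvBL_top lst x h
  set p := pvBL lst.length lst x 0 lst.length with hp
  rw [PySem.List.insert_natCast lst p x hle]
  have htake : ∀ a ∈ List.take p lst, a < x := by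
    intro a ha
    obtain ⟨m, hm, hma⟩ := List.mem_take_iff_getElem.1 ha
    have hmp : m < p := by omega
    have := hlt m hmp
    rwa [List.getD_eq_getElem _ _ (by omega), hma] at this
  have hdrop : ∀ b ∈ List.drop p lst, x < b := by
    intro b hb
    obtain ⟨m, hm, hmb⟩ := List.mem_drop_iff_getElem.1 hb
    have h1 := hge (p + m) (by omega) (by omega)
    rw [List.getD_eq_getElem _ _ (by omega), hmb] at h1
    rcases lt_or_eq_of_le h1 with h2 | h2
    · exact h2
    · exact absurd (h2 ▸ (hmb ▸ List.getElem_mem (by omega) : b ∈ lst)) (h2 ▸ hx)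
  constructor
  · rw [List.pairwise_append]
    refine ⟨List.Pairwise.sublist (List.take_sublist p lst) h, ?_, ?_⟩
    · rw [List.pairwise_cons]
      exact ⟨hdrop, List.Pairwise.sublist (List.drop_sublist p lst) h⟩
    · intro a ha b hb
      rcases List.mem_cons.1 hb with rfl | hb'
      · exact htake a ha
      · exact lt_trans (htake a ha) (hdrop b hb')
  · intro q
    simp only [List.mem_append, List.mem_cons]
    constructor
    · rintro (hq | rfl | hq)
      · exact Or.inr ((List.take_sublist p lst).mem hq)
      · exact Or.inl rfl
      · exact Or.inr ((List.drop_sublist p lst).mem hq)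
    · rintro (rfl | hq)
      · exact Or.inr (Or.inl rfl)
      · rw [← List.take_append_drop p lst] at hq
        rcases List.mem_append.1 hq with hq | hq
        · exact Or.inl hq
        · exact Or.inr (Or.inr hq)

theorem pvBuild_inv (T : List Int) : pvInv T (pvBuild T) := by
  intro u
  have h1 : pvBuild T =
      ((PySem.List.enumerate T).map (fun p => (p.2, p.1))).foldl
        (fun d q => d.modify q.1 [] (fun l => l ++ [q.2])) PySem.Dict.empty := by
    rw [pvBuild, List.foldl_map]
  rw [h1, PySem.Dict.getD_foldl_modify_append]
  rw [PySem.List.enumerate_eq_map_pyRange T 0, PySem.List.len_eq, PySem.List.pyRange_zero_natCast]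
  simp only [List.map_map, List.filter_map, Function.comp_def, PySem.List.pyGetD_natCast]
  simp [pvPosL]

-- A's inner scan: no match in [j, len) ⇒ no swap
theorem pvScanA_none (T : List Int) (i : Nat) : ∀ (f j : Nat), T.length - j ≤ f →
    (∀ m, j ≤ m → m < T.length → T.getD m 0 ≠ T.getD i 0) →
    pvScanA f T i j = (T, 0) := by
  intro f
  induction f with
  | zero => intro j _ _; rfl
  | succ f ih =>
    intro j hf hnone
    rw [pvScanA]
    by_cases hj : j < T.length
    · rw [if_pos hj, if_neg (fun he => hnone j (le_refl _) hj he.symm)]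
      exact ih (j+1) (by omega) (fun m hm hml => hnone m (by omega) hml)
    · rw [if_neg hj]

-- A's inner scan: first match at m ⇒ swap unless m = i+1
theorem pvScanA_found (T : List Int) (i : Nat) : ∀ (f j m : Nat), T.length - j ≤ f →
    j ≤ m → m < T.length → T.getD m 0 = T.getD i 0 →
    (∀ m', j ≤ m' → m' < m → T.getD m' 0 ≠ T.getD i 0) →
    pvScanA f T i j =
      if m ≠ i + 1 then ((T.set (i+1) (T.getD m 0)).set m (T.getD (i+1) 0), 1) else (T, 0) := by
  intro f
  induction f with
  | zero => intro j m hf hjm hml _ _; omega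
  | succ f ih =>
    intro j m hf hjm hml heq hmin
    rw [pvScanA, if_pos (by omega : j < T.length)]
    rcases Nat.eq_or_lt_of_le hjm with rfl | hjm'
    · rw [if_pos heq.symm]
    · rw [if_neg (fun he => hmin j (le_refl _) hjm' he.symm)]
      exact ih (j+1) m (by omega) (by omega) hml heq (fun m' h1 h2 => hmin m' (by omega) h2)

-- B's binary-search query returns length iff no position > i holds the value
theorem pvQuery_none (T : List Int) (i : Nat)
    (hnone : ∀ m, i + 1 ≤ m → m < T.length → T.getD m 0 ≠ T.getD i 0) :
    pvBR (pvPosL T (T.getD i 0)).length (pvPosL T (T.getD i 0)) (i : Int) 0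
      (pvPosL T (T.getD i 0)).length = (pvPosL T (T.getD i 0)).length := by
  apply pvBR_all_le _ _ (pvPairwise_posL T _)
  intro p hp
  obtain ⟨k, hk, hke, rfl⟩ := (pvMem_posL T _ p).1 hp
  by_contra hcon
  have hik : i + 1 ≤ k := by
    have : (i : Int) < (k : Int) := by omega
    exact_mod_cast this
  exact hnone k hik hk hke

-- B's binary-search query finds exactly the first matching position
theorem pvQuery_found (T : List Int) (i m : Nat) (him : i + 1 ≤ m) (hmlen : m < T.length)
    (heq : T.getD m 0 = T.getD i 0)
    (hmin : ∀ m', i + 1 ≤ m' → m' < m → T.getD m' 0 ≠ T.getD i 0) :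
    pvBR (pvPosL T (T.getD i 0)).length (pvPosL T (T.getD i 0)) (i : Int) 0
        (pvPosL T (T.getD i 0)).length < (pvPosL T (T.getD i 0)).length ∧
      (pvPosL T (T.getD i 0)).getD (pvBR (pvPosL T (T.getD i 0)).length (pvPosL T (T.getD i 0))
        (i : Int) 0 (pvPosL T (T.getD i 0)).length) 0 = (m : Int) := by
  have hmem : (m : Int) ∈ pvPosL T (T.getD i 0) := (pvMem_posL T _ _).2 ⟨m, hmlen, heq, rfl⟩
  have hxm : (i : Int) < (m : Int) := by exact_mod_cast (by omega : i < m)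
  obtain ⟨hk, hxlt, hkm, hminq⟩ :=
    pvBR_found (pvPosL T (T.getD i 0)) (i : Int) (m : Int) (pvPairwise_posL T _) hmem hxm
  obtain ⟨k0, hk0, hk0e, hk0v⟩ := (pvMem_posL T _ _).1 hkm
  refine ⟨hk, ?_⟩
  have hik0 : i < k0 := by
    have := hk0v ▸ hxlt
    exact_mod_cast this
  have hmk0 : m ≤ k0 := by
    by_contra hcon
    exact hmin k0 (by omega) (by omega) hk0e
  have hk0m : k0 ≤ m := by
    have := hminq (m : Int) hmem hxm
    rw [hk0v] at this
    exact_mod_cast this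
  rw [hk0v]
  exact_mod_cast congrArg (Nat.cast : Nat → Int) (by omega : k0 = m)

-- the updated dict satisfies the invariant for the swapped list
theorem pvInv_step (T : List Int) (pos : PySem.Dict Int (List Int)) (hInv : pvInv T pos)
    (i m : Nat) (him : i + 1 < m) (hmlen : m < T.length)
    (heq : T.getD m 0 = T.getD i 0)
    (hmin : ∀ m', i + 1 ≤ m' → m' < m → T.getD m' 0 ≠ T.getD i 0)
    (lst2 la2 : List Int)
    (hl2p : lst2.Pairwise (· < ·))
    (hl2m : ∀ q, q ∈ lst2 ↔ q = ((i : Int) + 1) ∨ (q ∈ pvPosL T (T.getD i 0) ∧ q ≠ (m : Int)))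
    (ha2p : la2.Pairwise (· < ·))
    (ha2m : ∀ q, q ∈ la2 ↔ q = (m : Int) ∨
      (q ∈ pvPosL T (T.getD (i+1) 0) ∧ q ≠ ((i : Int) + 1))) :
    pvInv ((T.set (i+1) (T.getD m 0)).set m (T.getD (i+1) 0))
      ((pos.insert (T.getD i 0) lst2).insert (T.getD (i+1) 0) la2) := by
  intro u
  have hia : T.getD (i+1) 0 ≠ T.getD i 0 := hmin (i+1) (le_refl _) him
  have hlen1 : (T.set (i+1) (T.getD m 0)).length = T.length := by simp
  have hlenT' : ((T.set (i+1) (T.getD m 0)).set m (T.getD (i+1) 0)).length = T.length := by simp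
  have hm1 : m ≠ i + 1 := by omega
  have hi1len : i + 1 < T.length := by omega
  -- value of T' at each index
  have hT'm : ((T.set (i+1) (T.getD m 0)).set m (T.getD (i+1) 0)).getD m 0 = T.getD (i+1) 0 := by
    rw [pvGetD_set]
    simp [hmlen]
  have hT'i1 : ((T.set (i+1) (T.getD m 0)).set m (T.getD (i+1) 0)).getD (i+1) 0 = T.getD m 0 := by
    rw [pvGetD_set, if_neg (by omega), pvGetD_set]
    simp [hi1len]
  have hT'o : ∀ k : Nat, k ≠ m → k ≠ i + 1 →
      ((T.set (i+1) (T.getD m 0)).set m (T.getD (i+1) 0)).getD k 0 = T.getD k 0 := by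
    intro k hkm hki
    rw [pvGetD_set, if_neg (by omega), pvGetD_set, if_neg (by omega)]
  -- membership of positions in T'
  have hmemT' : ∀ q, q ∈ pvPosL ((T.set (i+1) (T.getD m 0)).set m (T.getD (i+1) 0)) u ↔
      ∃ k : Nat, k < T.length ∧
        ((T.set (i+1) (T.getD m 0)).set m (T.getD (i+1) 0)).getD k 0 = u ∧ q = (k : Int) := by
    intro q
    rw [pvMem_posL, hlenT']
  by_cases hua : u = T.getD (i+1) 0
  · subst hua
    rw [PySem.Dict.getD_insert, if_pos rfl]
    refine pvSorted_ext _ _ ha2p (pvPairwise_posL _ _) ?_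
    intro q
    rw [ha2m, hmemT']
    constructor
    · rintro (rfl | ⟨hq, hne⟩)
      · exact ⟨m, hmlen, hT'm, rfl⟩
      · obtain ⟨k0, hk0, hk0e, rfl⟩ := (pvMem_posL T _ _).1 hq
        have hk0i : k0 ≠ i + 1 := fun he => hne (by rw [he]; push_cast; ring)
        have hk0m : k0 ≠ m := fun he => (heq ▸ he ▸ hk0e : T.getD i 0 = T.getD (i+1) 0).symm
          |> (fun h => hia (by rw [← hk0e, he, heq]))
        exact ⟨k0, hk0, by rw [hT'o k0 hk0m hk0i, hk0e], rfl⟩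
    · rintro ⟨k, hk, hke, rfl⟩
      by_cases hkm : k = m
      · subst hkm; exact Or.inl rfl
      by_cases hki : k = i + 1
      · subst hki
        rw [hT'i1] at hke
        exact absurd (hke.symm.trans heq) hia
      · rw [hT'o k hkm hki] at hke
        refine Or.inr ⟨(pvMem_posL T _ _).2 ⟨k, hk, hke, rfl⟩, ?_⟩
        intro hcast
        exact hki (by exact_mod_cast (by push_cast at hcast ⊢; omega : (k : Int) = ((i+1 : Nat) : Int)))
  · by_cases huv : u = T.getD i 0
    · subst huv
      rw [PySem.Dict.getD_insert, if_neg hua, PySem.Dict.getD_insert, if_pos rfl]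
      refine pvSorted_ext _ _ hl2p (pvPairwise_posL _ _) ?_
      intro q
      rw [hl2m, hmemT']
      constructor
      · rintro (rfl | ⟨hq, hne⟩)
        · refine ⟨i+1, hi1len, by rw [hT'i1, heq], by push_cast; ring⟩
        · obtain ⟨k0, hk0, hk0e, rfl⟩ := (pvMem_posL T _ _).1 hq
          have hk0m : k0 ≠ m := fun he => hne (by rw [he])
          have hk0i : k0 ≠ i + 1 := fun he => (hia (he ▸ hk0e))
          exact ⟨k0, hk0, by rw [hT'o k0 hk0m hk0i, hk0e], rfl⟩
      · rintro ⟨k, hk, hke, rfl⟩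
        by_cases hki : k = i + 1
        · subst hki; exact Or.inl (by push_cast; ring)
        by_cases hkm : k = m
        · subst hkm
          rw [hT'm] at hke
          exact absurd hke hia
        · rw [hT'o k hkm hki] at hke
          refine Or.inr ⟨(pvMem_posL T _ _).2 ⟨k, hk, hke, rfl⟩, ?_⟩
          intro hcast
          exact hkm (by exact_mod_cast hcast)
    · rw [PySem.Dict.getD_insert, if_neg hua, PySem.Dict.getD_insert, if_neg huv, hInv u]
      refine pvSorted_ext _ _ (pvPairwise_posL _ _) (pvPairwise_posL _ _) ?_
      intro q
      rw [pvMem_posL, hmemT']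
      constructor
      · rintro ⟨k, hk, hke, rfl⟩
        have hkm : k ≠ m := fun he => huv (by rw [← heq, ← he, hke])
        have hki : k ≠ i + 1 := fun he => hua (by rw [← he, hke])
        exact ⟨k, hk, by rw [hT'o k hkm hki, hke], rfl⟩
      · rintro ⟨k, hk, hke, rfl⟩
        by_cases hkm : k = m
        · subst hkm; rw [hT'm] at hke; exact absurd hke.symm hua
        by_cases hki : k = i + 1
        · subst hki; rw [hT'i1, heq] at hke; exact absurd hke.symm huv
        · rw [hT'o k hkm hki] at hke
          exact ⟨k, hk, hke, rfl⟩

-- main equivalence of the two loops under the invariant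
theorem pvMain : ∀ (f : Nat) (T : List Int) (pos : PySem.Dict Int (List Int)) (i : Nat),
    pvInv T pos → pvRunA f T i = pvRunB f T pos i := by
  intro f
  induction f with
  | zero => intro T pos i _; rfl
  | succ f ih =>
    intro T pos i hInv
    by_cases hi : i < T.length
    · have hlst := hInv (T.getD i 0)
      by_cases hex : ∃ n, i + 1 ≤ n ∧ n < T.length ∧ T.getD n 0 = T.getD i 0
      · classical
        set m := Nat.find hex with hmdef
        obtain ⟨hm1, hm2, hm3⟩ := Nat.find_spec hex
        have hmin : ∀ m', i + 1 ≤ m' → m' < m → T.getD m' 0 ≠ T.getD i 0 :=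
          fun m' h1 h2 h3 => Nat.find_min hex h2 ⟨h1, by omega, h3⟩
        have hq := pvQuery_found T i m hm1 hm2 hm3 hmin
        rw [pvRunA, if_pos hi,
          pvScanA_found T i (T.length - (i+1)) (i+1) m (le_refl _) hm1 hm2 hm3 hmin]
        rw [pvRunB, if_pos hi]
        simp only [hlst]
        rw [if_neg (Nat.ne_of_lt hq.1)]
        simp only [hq.2, Int.toNat_natCast]
        by_cases hmi : m = i + 1
        · rw [if_neg (by omega : ¬ m ≠ i + 1), if_pos (by push_cast [hmi]; ring)]
          simpa using ih T pos (i+2) hInv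
        · have him : i + 1 < m := by omega
          have hav : T.getD (i+1) 0 ≠ T.getD i 0 := hmin (i+1) (le_refl _) him
          rw [if_pos hmi, if_neg (fun h => hmi (by exact_mod_cast h))]
          simp only []
          rw [PySem.Dict.getD_insert, if_neg hav, hInv (T.getD (i+1) 0)]
          -- invariant preservation pieces
          have hpl := pvPairwise_posL T (T.getD i 0)
          have he1 := pvEraseIdx_sorted (pvPosL T (T.getD i 0)) _ hpl hq.1
          have hi1notin : ((i : Int) + 1) ∉
              (pvPosL T (T.getD i 0)).eraseIdx (pvBR (pvPosL T (T.getD i 0)).length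
                (pvPosL T (T.getD i 0)) (i : Int) 0 (pvPosL T (T.getD i 0)).length) := by
            intro hqin
            obtain ⟨hmem', _⟩ := (he1.2 _).1 hqin
            obtain ⟨k0, hk0, hk0e, hc⟩ := (pvMem_posL T _ _).1 hmem'
            have hk0i : k0 = i + 1 := by omega
            exact hav (hk0i ▸ hk0e)
          have hins := pvInsert_sorted _ ((i : Int) + 1) he1.1 hi1notin
          have hpa := pvPairwise_posL T (T.getD (i+1) 0)
          have hmem_ia : ((i : Int) + 1) ∈ pvPosL T (T.getD (i+1) 0) :=
            (pvMem_posL T _ _).2 ⟨i+1, by omega, rfl, by push_cast; ring⟩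
          have hbl := pvBL_index (pvPosL T (T.getD (i+1) 0)) ((i : Int) + 1) hpa hmem_ia
          have he2 := pvEraseIdx_sorted (pvPosL T (T.getD (i+1) 0)) _ hpa hbl.1
          have hmnotin : ((m : Nat) : Int) ∉
              (pvPosL T (T.getD (i+1) 0)).eraseIdx (pvBL (pvPosL T (T.getD (i+1) 0)).length
                (pvPosL T (T.getD (i+1) 0)) ((i : Int) + 1) 0
                (pvPosL T (T.getD (i+1) 0)).length) := by
            intro hqin
            obtain ⟨hmem', _⟩ := (he2.2 _).1 hqin
            obtain ⟨k0, hk0, hk0e, hc⟩ := (pvMem_posL T _ _).1 hmem'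
            have hk0m : k0 = m := by exact_mod_cast hc.symm
            exact hav ((hk0m ▸ hk0e : T.getD m 0 = T.getD (i+1) 0).symm.trans hm3)
          have hins2 := pvInsert_sorted _ ((m : Nat) : Int) he2.1 hmnotin
          congr 1
          refine ih _ _ (i+2) ?_
          refine pvInv_step T pos hInv i m him hm2 hm3 hmin _ _ hins.1 ?_ hins2.1 ?_
          · intro q
            rw [hins.2 q, he1.2 q, hq.2]
          · intro q
            rw [hins2.2 q, he2.2 q, hbl.2]
      · -- no partner: both sides skip
        have hnone : ∀ m, i + 1 ≤ m → m < T.length → T.getD m 0 ≠ T.getD i 0 := by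
          intro m h1 h2 h3
          exact hex ⟨m, h1, h2, h3⟩
        rw [pvRunA, if_pos hi, pvScanA_none T i _ (i+1) (le_refl _) hnone]
        rw [pvRunB, if_pos hi]
        simp only [hlst]
        rw [if_pos (pvQuery_none T i hnone)]
        simpa using ih T pos (i+2) hInv
    · rw [pvRunA, pvRunB, if_neg hi, if_neg hi]

-- ===== VERDICT (by name: the statement is the Claim_ definition above) =====
theorem suit_and_tie_2_spec : Claim_equal_suit_and_tie_2 := by
  intro T _
  unfold Spec_suit_and_tie_2 suit_and_tie_2 suit_and_tie_2_alt
  exact pvMain T.length T (pvBuild T) 0 (pvBuild_inv T)
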